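-- pv_equiv track=rewrite | github.com/Khanshh/demo1 | Documents/Code/RPIT/57.py | check_is_prime
-- ===== SOURCE A (Python) =====
-- def is_prime(digit):
-- 	return digit in {'2', '3', '5','7'}
--
-- def check_is_prime(n):
-- 	for i in range(len(n)):
-- 		if i in [2, 3, 5, 7]:
-- 			if not is_prime(n[i]):
-- 				return False
-- 		else:
-- 			if is_prime(n[i]):
-- 				return False
-- 	return True
-- ===== SOURCE B (Python) =====
-- def check_is_prime(n):
--     primes = {i for i, c in enumerate(n) if c in {'2', '3', '5', '7'}}
--     needed = {2, 3, 5, 7} & set(range(len(n)))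
--     return primes == needed
-- ===== Notes on version B (the rewrite author's own statement) =====
-- stated objective: idiomatic
-- what changed: Replaces the per-index loop with early returns by building the set of prime-digit indices and comparing it to the required positions {2,3,5,7} intersected with the valid index range.
import Mathlib
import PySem

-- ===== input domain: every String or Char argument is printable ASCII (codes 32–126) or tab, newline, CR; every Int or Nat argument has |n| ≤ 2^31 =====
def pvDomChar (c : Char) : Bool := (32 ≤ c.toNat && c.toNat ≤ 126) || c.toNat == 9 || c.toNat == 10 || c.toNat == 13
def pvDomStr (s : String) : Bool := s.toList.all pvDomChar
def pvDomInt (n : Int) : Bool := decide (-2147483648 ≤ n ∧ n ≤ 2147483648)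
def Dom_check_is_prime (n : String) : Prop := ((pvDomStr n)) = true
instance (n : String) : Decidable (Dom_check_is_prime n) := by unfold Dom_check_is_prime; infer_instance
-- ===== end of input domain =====

-- B replaces A's per-index loop with early returns by an index-set comparison (idiomatic).

-- ===== PORT A =====
-- is_prime(digit): digit in {'2','3','5','7'}
def pvIsPrimeDigit (c : Char) : Bool := decide (c ∈ PySem.Set.ofList ['2', '3', '5', '7'])

-- the for-loop over i in range(len(n)) with early returns, i carried as the Int loop index
def pvLoopA : List Char → Int → Bool
  | [], _ => true
  | c :: cs, i =>
    if i ∈ ([2, 3, 5, 7] : List Int) then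
      if ¬ pvIsPrimeDigit c then false else pvLoopA cs (i + 1)
    else
      if pvIsPrimeDigit c then false else pvLoopA cs (i + 1)

def check_is_prime (n : String) : Bool := pvLoopA n.toList 0

-- ===== PORT B =====
def check_is_prime_alt (n : String) : Bool :=
  let primes : PySem.Set Int :=
    PySem.Set.ofList (((PySem.List.enumerate n.toList).filter (fun p => pvIsPrimeDigit p.2)).map (·.1))
  let needed : PySem.Set Int :=
    PySem.Set.inter (PySem.Set.ofList [2, 3, 5, 7])
      (PySem.Set.ofList (PySem.List.pyRange 0 (n.toList.length : Int) 1))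
  PySem.Set.equal primes needed

-- ===== PRECONDITION & SPEC =====
def Spec_check_is_prime (n : String) (out : Bool) : Prop := out = check_is_prime_alt n
instance (n : String) (out : Bool) : Decidable (Spec_check_is_prime n out) := by unfold Spec_check_is_prime; infer_instance

-- ===== CLAIM (what is proved, stated in full; the proofs are below) =====
def Claim_equal_check_is_prime : Prop := ∀ (n : String), Dom_check_is_prime n → Spec_check_is_prime n (check_is_prime n)

-- ===== LEMMAS AND PROOFS =====

-- characterisation of A's loop
theorem pvLoopA_iff (cs : List Char) (k : Int) :
    pvLoopA cs k = true ↔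
      ∀ (j : Nat) (h : j < cs.length),
        ((k + j ∈ ([2, 3, 5, 7] : List Int)) ↔ pvIsPrimeDigit cs[j] = true) := by
  induction cs generalizing k with
  | nil => simp [pvLoopA]
  | cons c cs ih =>
    simp only [pvLoopA]
    have step : (∀ (j : Nat) (h : j < (c :: cs).length),
        ((k + j ∈ ([2, 3, 5, 7] : List Int)) ↔ pvIsPrimeDigit (c :: cs)[j] = true)) ↔
        ((k ∈ ([2, 3, 5, 7] : List Int) ↔ pvIsPrimeDigit c = true) ∧
          ∀ (j : Nat) (h : j < cs.length),
            ((k + 1 + j ∈ ([2, 3, 5, 7] : List Int)) ↔ pvIsPrimeDigit cs[j] = true)) := by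
      constructor
      · intro h
        refine ⟨by simpa using h 0 (by simp), fun j hj => ?_⟩
        have := h (j + 1) (by simpa using hj)
        simpa [add_comm, add_left_comm, add_assoc] using this
      · rintro ⟨h0, h⟩ (j | j) hj
        · simpa using h0
        · have := h j (by simpa using hj)
          simpa [add_comm, add_left_comm, add_assoc] using this
    rw [step]
    by_cases hk : k ∈ ([2, 3, 5, 7] : List Int) <;>
      by_cases hp : pvIsPrimeDigit c = true <;>
      simp [hk, hp, ih]

-- membership in B's primes set
theorem mem_primesB (cs : List Char) (x : Int) :
    (x ∈ PySem.Set.ofList (((PySem.List.enumerate cs).filter (fun p => pvIsPrimeDigit p.2)).map (·.1))) ↔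
      ∃ (k : Nat) (h : k < cs.length), x = k ∧ pvIsPrimeDigit cs[k] = true := by
  simp only [PySem.Set.mem_ofList, List.mem_map, List.mem_filter]
  constructor
  · rintro ⟨p, ⟨hmem, hpr⟩, hx⟩
    rw [PySem.List.mem_enumerate_iff] at hmem
    obtain ⟨k, hk, rfl⟩ := hmem
    exact ⟨k, hk, by simpa using hx.symm, by simpa using hpr⟩
  · rintro ⟨k, hk, rfl, hpr⟩
    exact ⟨((k : Int), cs[k]), ⟨(PySem.List.mem_enumerate_iff _ _ _).2 ⟨k, hk, by simp⟩, hpr⟩, rfl⟩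

-- membership in B's needed set
theorem mem_neededB (len : Nat) (x : Int) :
    (x ∈ PySem.Set.inter (PySem.Set.ofList ([2, 3, 5, 7] : List Int))
        (PySem.Set.ofList (PySem.List.pyRange 0 (len : Int) 1))) ↔
      x ∈ ([2, 3, 5, 7] : List Int) ∧ 0 ≤ x ∧ x < (len : Int) := by
  rw [PySem.Set.mem_inter]
  simp [PySem.Set.mem_ofList, PySem.List.mem_pyRange_one]

theorem check_is_prime_eq (n : String) : check_is_prime n = check_is_prime_alt n := by
  have key : check_is_prime n = true ↔ check_is_prime_alt n = true := by
    unfold check_is_prime check_is_prime_alt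
    rw [pvLoopA_iff, PySem.Set.equal_iff]
    constructor
    · intro h x
      rw [mem_primesB, mem_neededB]
      constructor
      · rintro ⟨k, hk, rfl, hpr⟩
        have := (h k hk).2 hpr
        refine ⟨by simpa using this, by positivity, by exact_mod_cast hk⟩
      · rintro ⟨hx, hx0, hxlt⟩
        obtain ⟨k, rfl⟩ := Int.eq_ofNat_of_zero_le hx0
        have hk : k < n.toList.length := by exact_mod_cast hxlt
        exact ⟨k, hk, rfl, (h k hk).1 (by simpa using hx)⟩
    · intro h j hj
      have hx := h (j : Int)
      rw [mem_primesB, mem_neededB] at hx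
      constructor
      · intro hmem
        obtain ⟨k, hk, hkj, hpr⟩ := hx.2 ⟨by simpa using hmem, by positivity, by exact_mod_cast hj⟩
        have : k = j := by exact_mod_cast hkj.symm
        subst this; exact hpr
      · intro hpr
        have := (hx.1 ⟨j, hj, rfl, hpr⟩).1
        simpa using this
  cases hA : check_is_prime n <;> cases hB : check_is_prime_alt n <;> simp_all

-- ===== VERDICT (by name: the statement is the Claim_ definition above) =====
theorem check_is_prime_spec : Claim_equal_check_is_prime := by
  intro n _
  exact check_is_prime_eq n
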